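-- pv_equiv track=rewrite | github.com/SofferLior/TAU_Israel_Software | TailOR_Swift.py | parse_secondary_from_seq
-- ===== SOURCE A (Python) =====
-- def parse_secondary_from_seq(seq):
--     data = seq.replace('\n', '').split("\"featureString\":\"")[1].split("\",\"reliability\"")[0].replace("\\n", "")
--     res = []
--     current_pos = 0
--     curr_len = 0
--     total_len = 0
--     for pos in data:
--         total_len += 1
--         if pos != 'L' and curr_len == 0:
--             current_pos += 1
--         elif pos != 'L' and curr_len != 0:
--             res.append((current_pos, current_pos + curr_len))
--             current_pos += (curr_len + 1)
--             curr_len = 0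
--         else:
--             curr_len += 1
--     return res, total_len
-- ===== SOURCE B (Python) =====
-- import re
--
--
-- def parse_secondary_from_seq(seq):
--     data = seq.replace('\n', '').split("\"featureString\":\"")[1].split("\",\"reliability\"")[0].replace("\\n", "")
--     n = len(data)
--     res = [(m.start(), m.end()) for m in re.finditer('L+', data) if m.end() < n]
--     return res, n
-- ===== Notes on version B (the rewrite author's own statement) =====
-- stated objective: idiomatic
-- what changed: Replaced the four-variable per-character state machine with regex run-finding: re.finditer yields the maximal runs of the letter L directly and a comprehension keeps those ending before the end of the string.
import Mathlib
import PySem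

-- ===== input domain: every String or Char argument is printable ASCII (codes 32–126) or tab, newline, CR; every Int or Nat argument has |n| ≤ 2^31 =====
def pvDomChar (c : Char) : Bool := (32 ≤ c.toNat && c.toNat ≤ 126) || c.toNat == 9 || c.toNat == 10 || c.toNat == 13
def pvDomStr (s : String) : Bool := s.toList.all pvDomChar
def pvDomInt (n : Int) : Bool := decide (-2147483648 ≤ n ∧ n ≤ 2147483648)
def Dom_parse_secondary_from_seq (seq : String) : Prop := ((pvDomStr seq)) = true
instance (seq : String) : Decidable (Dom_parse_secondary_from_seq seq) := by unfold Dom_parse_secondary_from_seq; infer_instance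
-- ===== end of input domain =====

-- B replaces A's one-character state machine by maximal-'L'-run finding (re.finditer in Source B); objective: idiomatic, same cost.
-- Pre_ excludes exactly the inputs on which both Pythons raise IndexError (the "featureString" marker absent).

-- shared preamble line of BOTH Pythons (identical in Source A and Source B): extract the feature string;
-- none = the IndexError of `[1]` (marker absent). `[0]` of a split result never fails in Python;
-- it is kept as an option match (the none arm is unreachable) to stay a literal transliteration.
def pvExtractData (seq : String) : Option String :=
  let parts := (PySem.Str.split? (PySem.Str.replace seq "\n" "") "\"featureString\":\"").getD []
  match PySem.List.pyGet? parts 1 with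
  | none => none
  | some t =>
    let parts2 := (PySem.Str.split? t "\",\"reliability\"").getD []
    match PySem.List.pyGet? parts2 0 with
    | none => none
    | some u => some (PySem.Str.replace u "\\n" "")

-- ===== PORT A =====
-- the body of A's for-loop, on the state (res, current_pos, curr_len, total_len)
def pvStepA (st : List (Int × Int) × Int × Int × Int) (pos : Char) : List (Int × Int) × Int × Int × Int :=
  let (res, current_pos, curr_len, total_len) := st
  let total_len := total_len + 1
  if pos ≠ 'L' ∧ curr_len = 0 then (res, current_pos + 1, curr_len, total_len)
  else if pos ≠ 'L' ∧ curr_len ≠ 0 then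
    (res ++ [(current_pos, current_pos + curr_len)], current_pos + (curr_len + 1), 0, total_len)
  else (res, current_pos, curr_len + 1, total_len)

def parse_secondary_from_seq (seq : String) : (List (Int × Int)) × Int :=
  match pvExtractData seq with
  | none => ([], 0)   -- unreachable under Pre_ (the Python raises IndexError here)
  | some data =>
    let st := data.toList.foldl pvStepA ([], 0, 0, 0)
    (st.1, st.2.2.2)

-- ===== PORT B =====
-- port of `re.finditer('L+', data)`: scan for maximal runs of 'L'; emit (start, end) when end < n
def pvFindLRuns (l : List Char) (i : Int) (n : Int) : List (Int × Int) :=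
  match l with
  | [] => []
  | c :: rest =>
    if c = 'L' then
      let k : Int := (rest.takeWhile (· = 'L')).length + 1
      (if i + k < n then [(i, i + k)] else []) ++ pvFindLRuns (rest.dropWhile (· = 'L')) (i + k) n
    else pvFindLRuns rest (i + 1) n
termination_by l.length
decreasing_by
  · have := List.length_dropWhile_le (p := (· = 'L')) (l := rest); simp; omega
  · simp

def parse_secondary_from_seq_alt (seq : String) : (List (Int × Int)) × Int :=
  match pvExtractData seq with
  | none => ([], 0)   -- unreachable under Pre_ (the Python raises IndexError here)
  | some data =>
    let n : Int := data.toList.length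
    (pvFindLRuns data.toList 0 n, n)

-- ===== PRECONDITION & SPEC =====
-- Pre_: the marker occurs in the newline-stripped input, i.e. the first split yields at least two
-- pieces; otherwise `[1]` raises IndexError in both Pythons.
def Pre_parse_secondary_from_seq (seq : String) : Prop :=
  2 ≤ ((PySem.Str.split? (PySem.Str.replace seq "\n" "") "\"featureString\":\"").getD []).length
instance (seq : String) : Decidable (Pre_parse_secondary_from_seq seq) := by
  unfold Pre_parse_secondary_from_seq; infer_instance

def pvWitness_parse_secondary_from_seq : String := "\"featureString\":\"LLHHL\",\"reliability\""

def Spec_parse_secondary_from_seq (seq : String) (out : (List (Int × Int)) × Int) : Prop := out = parse_secondary_from_seq_alt seq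
instance (seq : String) (out : (List (Int × Int)) × Int) : Decidable (Spec_parse_secondary_from_seq seq out) := by unfold Spec_parse_secondary_from_seq; infer_instance

-- ===== CLAIM (what is proved, stated in full; the proofs are below) =====
def Claim_equal_parse_secondary_from_seq : Prop := ∀ (seq : String), Dom_parse_secondary_from_seq seq → Pre_parse_secondary_from_seq seq → Spec_parse_secondary_from_seq seq (parse_secondary_from_seq seq)

-- ===== LEMMAS AND PROOFS =====
theorem pvFindLRuns_nil (i n : Int) : pvFindLRuns [] i n = [] := by rw [pvFindLRuns]

theorem pvFindLRuns_cons_L (rest : List Char) (i n : Int) :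
    pvFindLRuns ('L' :: rest) i n
      = (if i + (((rest.takeWhile (· = 'L')).length : Int) + 1) < n
           then [(i, i + (((rest.takeWhile (· = 'L')).length : Int) + 1))] else [])
        ++ pvFindLRuns (rest.dropWhile (· = 'L')) (i + (((rest.takeWhile (· = 'L')).length : Int) + 1)) n := by
  rw [pvFindLRuns]; simp

theorem pvFindLRuns_cons_ne (c : Char) (rest : List Char) (i n : Int) (hc : c ≠ 'L') :
    pvFindLRuns (c :: rest) i n = pvFindLRuns rest (i + 1) n := by
  rw [pvFindLRuns]; simp [hc]

theorem pv_dropWhile_head_false {p : Char → Bool} {l t : List Char} {d : Char}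
    (h : l.dropWhile p = d :: t) : p d = false := by
  induction l with
  | nil => simp at h
  | cons a as ih =>
    rw [List.dropWhile_cons] at h
    by_cases hp : p a = true
    · rw [if_pos hp] at h; exact ih h
    · rw [if_neg hp] at h
      cases h
      simpa using hp

theorem pvRun_consume (m : Nat) : ∀ (t : List Char) (res : List (Int × Int)) (cp cl tl : Int),
    (List.replicate m 'L' ++ t).foldl pvStepA (res, cp, cl, tl)
      = t.foldl pvStepA (res, cp, cl + m, tl + m) := by
  induction m with
  | zero => intro t res cp cl tl; simp
  | succ m ih =>
    intro t res cp cl tl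
    have hs : pvStepA (res, cp, cl, tl) 'L' = (res, cp, cl + 1, tl + 1) := by
      simp [pvStepA]
    rw [List.replicate_succ, List.cons_append, List.foldl_cons, hs, ih]
    have e1 : cl + 1 + (m : Int) = cl + ((m : Nat) + 1 : Nat) := by push_cast; ring
    have e2 : tl + 1 + (m : Int) = tl + ((m : Nat) + 1 : Nat) := by push_cast; ring
    rw [e1, e2]

theorem pvLoop_eq (N : Nat) : ∀ (l : List Char), l.length ≤ N → ∀ (res : List (Int × Int)) (cp tl : Int),
    (l.foldl pvStepA (res, cp, 0, tl)).1 = res ++ pvFindLRuns l cp (cp + l.length)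
    ∧ (l.foldl pvStepA (res, cp, 0, tl)).2.2.2 = tl + l.length := by
  induction N with
  | zero =>
    intro l hl res cp tl
    have : l = [] := List.length_eq_zero_iff.mp (Nat.le_zero.mp hl)
    subst this; simp [pvFindLRuns_nil]
  | succ N ih =>
    intro l hl res cp tl
    match l with
    | [] => simp [pvFindLRuns_nil]
    | c :: rest =>
      by_cases hc : c = 'L'
      · subst hc
        have htwrep : rest.takeWhile (· = 'L') = List.replicate (rest.takeWhile (· = 'L')).length 'L' := by
          apply List.eq_replicate_of_mem
          intro b hb
          simpa using List.mem_takeWhile_imp hb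
        have hstep : pvStepA (res, cp, 0, tl) 'L' = (res, cp, 1, tl + 1) := by
          simp [pvStepA]
        have hfold : ('L' :: rest).foldl pvStepA (res, cp, 0, tl)
            = (rest.dropWhile (· = 'L')).foldl pvStepA
                (res, cp, 1 + ((rest.takeWhile (· = 'L')).length : Int),
                 tl + 1 + ((rest.takeWhile (· = 'L')).length : Int)) := by
          conv_lhs => rw [List.foldl_cons, hstep,
            ← List.takeWhile_append_dropWhile (p := (· = 'L')) (l := rest), htwrep]
          rw [pvRun_consume]
        have hlen : rest.length = (rest.takeWhile (· = 'L')).length + (rest.dropWhile (· = 'L')).length := by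
          have h := congrArg List.length (List.takeWhile_append_dropWhile (p := (· = 'L')) (l := rest))
          rw [List.length_append] at h
          exact h.symm
        rw [hfold, pvFindLRuns_cons_L]
        cases htl : rest.dropWhile (· = 'L') with
        | nil =>
          rw [htl] at hlen
          simp only [List.length_nil, Nat.add_zero] at hlen
          constructor
          · simp [pvFindLRuns_nil]
            omega
          · simp only [List.foldl_nil, List.length_cons, hlen.symm]; push_cast; ring
        | cons d t' =>
          have hd : d ≠ 'L' := by
            simpa using pv_dropWhile_head_false htl
          rw [htl] at hlen
          simp only [List.length_cons] at hlen
          have hstep2 : pvStepA (res, cp, 1 + ((rest.takeWhile (· = 'L')).length : Int),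
                tl + 1 + ((rest.takeWhile (· = 'L')).length : Int)) d
              = (res ++ [(cp, cp + (1 + ((rest.takeWhile (· = 'L')).length : Int)))],
                 cp + ((1 + ((rest.takeWhile (· = 'L')).length : Int)) + 1), 0,
                 tl + 1 + ((rest.takeWhile (· = 'L')).length : Int) + 1) := by
            have h1 : ¬ (d ≠ 'L' ∧ (1 + ((rest.takeWhile (· = 'L')).length : Int)) = 0) := by
              rintro ⟨_, h0⟩; omega
            have h2 : (d ≠ 'L' ∧ (1 + ((rest.takeWhile (· = 'L')).length : Int)) ≠ 0) := ⟨hd, by omega⟩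
            simp only [pvStepA, if_pos h2, if_neg h1]
          have ht'len : t'.length ≤ N := by
            have h3 : rest.length ≤ N := by simpa using hl
            omega
          have ihap := ih t' ht'len (res ++ [(cp, cp + (1 + ((rest.takeWhile (· = 'L')).length : Int)))])
            (cp + ((1 + ((rest.takeWhile (· = 'L')).length : Int)) + 1))
            (tl + 1 + ((rest.takeWhile (· = 'L')).length : Int) + 1)
          have hlt : cp + (((rest.takeWhile (· = 'L')).length : Int) + 1)
              < cp + (('L' :: rest).length : Nat) := by
            simp only [List.length_cons, hlen]; push_cast; omega
          constructor
          · rw [List.foldl_cons, hstep2, ihap.1, if_pos hlt,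
              pvFindLRuns_cons_ne d t' _ _ hd]
            have e1 : cp + (1 + ((rest.takeWhile (· = 'L')).length : Int))
                = cp + (((rest.takeWhile (· = 'L')).length : Int) + 1) := by ring
            have e2 : cp + ((1 + ((rest.takeWhile (· = 'L')).length : Int)) + 1)
                = cp + (((rest.takeWhile (· = 'L')).length : Int) + 1) + 1 := by ring
            have e3 : cp + (((rest.takeWhile (· = 'L')).length : Int) + 1) + 1 + (t'.length : Nat)
                = cp + (('L' :: rest).length : Nat) := by
              simp only [List.length_cons, hlen]; push_cast; ring
            rw [e1, e2, e3]
            simp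
          · rw [List.foldl_cons, hstep2, ihap.2]
            simp only [List.length_cons, hlen]; push_cast; ring
      · have hstep : pvStepA (res, cp, 0, tl) c = (res, cp + 1, 0, tl + 1) := by
          simp [pvStepA, hc]
        have ihr := ih rest (by simpa using hl) res (cp + 1) (tl + 1)
        rw [List.foldl_cons, hstep, pvFindLRuns_cons_ne c rest _ _ hc]
        constructor
        · rw [ihr.1]
          have e : cp + 1 + (rest.length : Nat) = cp + ((c :: rest).length : Nat) := by
            simp only [List.length_cons]; push_cast; ring
          rw [e]
        · rw [ihr.2]; simp only [List.length_cons]; push_cast; ring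
-- ===== VERDICT (by name: the statement is the Claim_ definition above) =====
theorem parse_secondary_from_seq_spec : Claim_equal_parse_secondary_from_seq := by
  intro seq _ _
  unfold Spec_parse_secondary_from_seq parse_secondary_from_seq parse_secondary_from_seq_alt
  match h : pvExtractData seq with
  | none => rfl
  | some data =>
    have hmain := pvLoop_eq data.toList.length data.toList le_rfl [] 0 0
    simp only [List.nil_append, zero_add] at hmain
    simp [hmain.1, hmain.2]
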